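-- pv_equiv track=rewrite | github.com/H1drogen/Algorithms | HackerRank/GridChallenge.py | gridChallengeAns
-- ===== SOURCE A (Python) =====
-- def gridChallengeAns(grid):
--     for i in range(len(grid)):
--         grid[i] = sorted(grid[i])
--     for i in range(len(grid[0])):
--         for j in range(1, len(grid)):
--             if grid[j][i] < grid[j - 1][i]:
--                 return 'NO'
--     return 'YES'
-- ===== SOURCE B (Python) =====
-- # B: transpose the (row-sorted) grid and test each column's sortedness as a whole,
-- # instead of A's interleaved double-index pairwise scan. Mutates grid in place like A.
-- def gridChallengeAns(grid):
--     for i in range(len(grid)):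
--         grid[i] = sorted(grid[i])
--     cols = [[row[i] for row in grid] for i in range(len(grid[0]))]
--     for col in cols:
--         if col != sorted(col):
--             return 'NO'
--     return 'YES'
-- ===== Notes on version B (the rewrite author's own statement) =====
-- stated objective: alternative
-- what changed: B replaces A's interleaved double-index column scan with an explicit transpose (building each column as a list) followed by a whole-column col == sorted(col) sortedness test per column.
-- outside the precondition, e.g. on gridChallengeAns(['bb', 'a']): A returns 'NO', B raises IndexError
import Mathlib
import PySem

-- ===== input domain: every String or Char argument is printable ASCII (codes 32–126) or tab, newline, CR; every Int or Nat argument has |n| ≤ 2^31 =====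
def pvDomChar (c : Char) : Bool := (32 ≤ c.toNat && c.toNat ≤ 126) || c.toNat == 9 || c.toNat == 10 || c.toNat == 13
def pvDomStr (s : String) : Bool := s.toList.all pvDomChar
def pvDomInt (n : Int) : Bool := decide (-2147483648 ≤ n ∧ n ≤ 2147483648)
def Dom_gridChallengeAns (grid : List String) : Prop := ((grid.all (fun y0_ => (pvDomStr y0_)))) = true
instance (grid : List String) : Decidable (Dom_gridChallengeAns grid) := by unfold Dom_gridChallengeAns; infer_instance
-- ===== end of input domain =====

-- B replaces A's interleaved double-index column scan with a transpose then a per-column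
-- whole-list sortedness test (alternative decomposition, same cost). Both Pythons sort the
-- rows of `grid` in place; the equivalence proved here is about the return value.

-- ===== PORT A =====
def gridChallengeAns (grid : List String) : String :=
  let g := grid.map (fun s => PySem.List.sorted s.toList (fun c => c) false)
  if (List.range (g.headD []).length).any (fun i =>
       (List.range' 1 (g.length - 1)).any (fun j =>
         decide ((g.getD j []).getD i default < (g.getD (j-1) []).getD i default)))
  then "NO" else "YES"

-- ===== PORT B =====
def gridChallengeAns_alt (grid : List String) : String :=
  let g := grid.map (fun s => PySem.List.sorted s.toList (fun c => c) false)
  let cols := (List.range ((g.headD []).length)).map (fun i => g.map (fun row => row.getD i default))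
  if cols.all (fun c => c == PySem.List.sorted c (fun x => x) false) then "YES" else "NO"

-- ===== PRECONDITION & SPEC =====
-- Pre_ excludes the empty grid and ragged grids with a row shorter than the first row:
-- there A raises IndexError, except when its scan happens to hit a 'NO' cell before the
-- short row — an accident of traversal order on which B itself raises.
def Pre_gridChallengeAns (grid : List String) : Prop :=
  grid ≠ [] ∧ ∀ s ∈ grid, (grid.headD "").length ≤ s.length
instance (grid : List String) : Decidable (Pre_gridChallengeAns grid) := by
  unfold Pre_gridChallengeAns; infer_instance
def pvWitness_gridChallengeAns : List String := ["cba", "daf", "ghe"]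

def Spec_gridChallengeAns (grid : List String) (out : String) : Prop := out = gridChallengeAns_alt grid
instance (grid : List String) (out : String) : Decidable (Spec_gridChallengeAns grid out) := by unfold Spec_gridChallengeAns; infer_instance

-- ===== CLAIM (what is proved, stated in full; the proofs are below) =====
def Claim_equal_gridChallengeAns : Prop := ∀ (grid : List String), Dom_gridChallengeAns grid → Pre_gridChallengeAns grid → Spec_gridChallengeAns grid (gridChallengeAns grid)

-- ===== LEMMAS AND PROOFS =====

-- one column: the pairwise adjacent scan finds a violation iff the column differs from its sort
lemma col_any_eq (c : List Char) :
    (List.range' 1 (c.length - 1)).any (fun j => decide (c.getD j default < c.getD (j-1) default))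
    = !(c == PySem.List.sorted c (fun x => x) false) := by
  have hiff : (c = PySem.List.sorted c (fun x => x) false) ↔ List.Pairwise (· ≤ ·) c := by
    constructor
    · intro h
      have := PySem.List.sorted_pairwise (xs := c) (key := fun x => x)
      rw [← h] at this
      simpa using this
    · intro h
      exact (PySem.List.sorted_eq_self_of_pairwise _ _ (by simpa using h)).symm
  rw [Bool.eq_iff_iff]
  simp only [List.any_eq_true, List.mem_range'_1, decide_eq_true_eq, Bool.not_eq_true',
    beq_eq_false_iff_ne, ne_eq, hiff]
  rw [← List.isChain_iff_pairwise, List.isChain_iff_getElem]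
  constructor
  · rintro ⟨j, ⟨h1, h2⟩, hlt⟩ hall
    rw [List.getD_eq_getElem _ _ (by omega), List.getD_eq_getElem _ _ (by omega)] at hlt
    have := hall (j-1) (by omega)
    have hj : j - 1 + 1 = j := by omega
    simp only [hj] at this
    exact absurd this (not_le.mpr hlt)
  · intro h
    by_contra hno
    push Not at hno
    apply h
    intro i hi
    by_contra hlt
    push Not at hlt
    have := hno (i+1) ⟨by omega, by omega⟩
    rw [List.getD_eq_getElem _ _ (by omega), List.getD_eq_getElem _ _ (by omega)] at this
    simp only [Nat.add_sub_cancel] at this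
    exact absurd hlt (not_lt.mpr this)

lemma map_getD_of_lt {α β : Type} [Inhabited α] [Inhabited β] (g : List α) (f : α → β) (j : Nat)
    (h : j < g.length) : (g.map f).getD j default = f (g.getD j default) := by
  rw [List.getD_eq_getElem _ _ (by simpa using h), List.getD_eq_getElem _ _ h]
  simp

lemma any_not_eq_not_all {α : Type} (l : List α) (q : α → Bool) :
    l.any (fun x => !q x) = !l.all q := by
  induction l with
  | nil => rfl
  | cons a t ih => simp [List.any_cons, List.all_cons, ih, Bool.not_and]

-- the two programs agree on every already-row-sorted grid
lemma core_eq (g : List (List Char)) :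
    (if (List.range (g.headD []).length).any (fun i =>
          (List.range' 1 (g.length - 1)).any (fun j =>
            decide ((g.getD j []).getD i default < (g.getD (j-1) []).getD i default)))
     then "NO" else "YES")
    = (if ((List.range ((g.headD []).length)).map
             (fun i => g.map (fun row => row.getD i default))).all
            (fun c => c == PySem.List.sorted c (fun x => x) false)
       then "YES" else "NO") := by
  have key : ∀ i : Nat,
      (List.range' 1 (g.length - 1)).any (fun j =>
        decide ((g.getD j []).getD i default < (g.getD (j-1) []).getD i default))
      = !((g.map (fun row => row.getD i default)) ==
          PySem.List.sorted (g.map (fun row => row.getD i default)) (fun x => x) false) := by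
    intro i
    rw [← col_any_eq]
    simp only [List.length_map]
    rw [Bool.eq_iff_iff]
    simp only [List.any_eq_true, List.mem_range'_1, decide_eq_true_eq]
    constructor
    · rintro ⟨j, hj, hlt⟩
      refine ⟨j, hj, ?_⟩
      rw [map_getD_of_lt _ _ _ (by omega), map_getD_of_lt _ _ _ (by omega)]
      exact hlt
    · rintro ⟨j, hj, hlt⟩
      refine ⟨j, hj, ?_⟩
      rw [map_getD_of_lt _ _ _ (by omega), map_getD_of_lt _ _ _ (by omega)] at hlt
      exact hlt
  have hcond : (List.range (g.headD []).length).any (fun i =>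
        (List.range' 1 (g.length - 1)).any (fun j =>
          decide ((g.getD j []).getD i default < (g.getD (j-1) []).getD i default)))
      = !(((List.range ((g.headD []).length)).map
            (fun i => g.map (fun row => row.getD i default))).all
           (fun c => c == PySem.List.sorted c (fun x => x) false)) := by
    rw [List.all_map]
    rw [← any_not_eq_not_all]
    exact congrArg (List.any _) (funext key)
  rw [hcond]
  cases h : ((List.range ((g.headD []).length)).map
      (fun i => g.map (fun row => row.getD i default))).all
      (fun c => c == PySem.List.sorted c (fun x => x) false) <;> simp

-- ===== VERDICT (by name: the statement is the Claim_ definition above) =====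
theorem gridChallengeAns_spec : Claim_equal_gridChallengeAns := by
  intro grid _ _
  exact core_eq (grid.map (fun s => PySem.List.sorted s.toList (fun c => c) false))
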